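-- pv_equiv track=rewrite | github.com/CaiJingLong/marscode_prompt | 009.py | solution
-- ===== SOURCE A (Python) =====
-- def solution(n, m, s, c):
--     # 统计货架上每种商品的数量
--     shelf_items = {}
--     for item in s:
--         shelf_items[item] = shelf_items.get(item, 0) + 1
--
--     # 统计每个位置能卖出多少商品
--     sales = 0
--     used_items = set()  # 记录已经使用过的商品
--
--     # 遍历每个顾客需求
--     for customer_need in c:
--         # 如果货架上有这个商品，且还未被使用
--         if customer_need in shelf_items and shelf_items[customer_need] > 0:
--             # 放置商品并更新统计
--             shelf_items[customer_need] -= 1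
--             sales += 1
--
--     return sales
-- ===== SOURCE B (Python) =====
-- def solution(n, m, s, c):
--     # Frequency tables for shelf and customer needs; answer = per-item-type overlap.
--     cs = {}
--     for x in s:
--         cs[x] = cs.get(x, 0) + 1
--     cc = {}
--     for x in c:
--         cc[x] = cc.get(x, 0) + 1
--     return sum(min(v, cc.get(k, 0)) for k, v in cs.items())
-- ===== Notes on version B (the rewrite author's own statement) =====
-- stated objective: simpler
-- what changed: Replaces A's per-customer scan over c with stateful inventory decrement (and drops the dead used_items set) by two frequency tables and a per-item-type sum of minima.
import Mathlib
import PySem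

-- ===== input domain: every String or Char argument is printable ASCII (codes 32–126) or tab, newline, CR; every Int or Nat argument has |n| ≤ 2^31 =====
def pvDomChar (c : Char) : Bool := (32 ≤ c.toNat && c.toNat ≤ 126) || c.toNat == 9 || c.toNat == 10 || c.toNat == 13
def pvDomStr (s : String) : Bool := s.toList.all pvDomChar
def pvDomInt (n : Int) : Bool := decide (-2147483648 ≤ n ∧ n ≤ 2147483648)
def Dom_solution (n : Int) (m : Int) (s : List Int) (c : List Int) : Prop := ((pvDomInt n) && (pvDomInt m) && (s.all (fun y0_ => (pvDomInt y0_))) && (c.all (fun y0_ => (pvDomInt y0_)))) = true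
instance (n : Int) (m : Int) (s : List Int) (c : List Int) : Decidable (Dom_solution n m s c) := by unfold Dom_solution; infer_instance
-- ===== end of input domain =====

-- B replaces A's stateful per-customer decrement loop by two frequency tables and a
-- per-item-type sum of minima (simpler; A's dead used_items set is dropped).

-- ===== PORT A =====
-- one iteration of A's loop over the customer needs (state: shelf dict, sales so far)
def pvStepA (p : PySem.Dict Int Int × Int) (need : Int) : PySem.Dict Int Int × Int :=
  if p.1.contains need && decide (p.1.getD need 0 > 0) then
    (p.1.insert need (p.1.getD need 0 - 1), p.2 + 1)
  else p

def solution (_n : Int) (_m : Int) (s : List Int) (c : List Int) : Int :=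
  -- shelf_items: item -> count, built over s (A's used_items set is dead: never read)
  let shelfItems : PySem.Dict Int Int :=
    s.foldl (fun d item => d.insert item (d.getD item 0 + 1)) PySem.Dict.empty
  (c.foldl pvStepA (shelfItems, 0)).2

-- ===== PORT B =====
def solution_alt (_n : Int) (_m : Int) (s : List Int) (c : List Int) : Int :=
  let cs : PySem.Dict Int Int :=
    s.foldl (fun d x => d.insert x (d.getD x 0 + 1)) PySem.Dict.empty
  let cc : PySem.Dict Int Int :=
    c.foldl (fun d x => d.insert x (d.getD x 0 + 1)) PySem.Dict.empty
  (cs.items.map (fun kv => min kv.2 (cc.getD kv.1 0))).sum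

-- ===== PRECONDITION & SPEC =====
def Spec_solution (n : Int) (m : Int) (s : List Int) (c : List Int) (out : Int) : Prop := out = solution_alt n m s c
instance (n : Int) (m : Int) (s : List Int) (c : List Int) (out : Int) : Decidable (Spec_solution n m s c out) := by unfold Spec_solution; infer_instance

-- ===== CLAIM (what is proved, stated in full; the proofs are below) =====
def Claim_equal_solution : Prop := ∀ (n : Int) (m : Int) (s : List Int) (c : List Int), Dom_solution n m s c → Spec_solution n m s c (solution n m s c)

-- ===== LEMMAS AND PROOFS =====

-- A's selling loop adds, per distinct need, the min of shelf stock and demand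
lemma pv_sell_loop (c : List Int) : ∀ (d : PySem.Dict Int Int) (sales : Int),
    (∀ k, 0 ≤ d.getD k 0) → (∀ k, 0 < d.getD k 0 → d.contains k = true) →
    (c.foldl pvStepA (d, sales)).2
      = sales + ∑ k ∈ c.toFinset, min (d.getD k 0) ((c.count k : Int)) := by
  induction c with
  | nil => intro d sales _ _; simp
  | cons x r ih =>
    intro d sales hnn hct
    simp only [List.foldl_cons, List.toFinset_cons]
    by_cases hx : 0 < d.getD x 0
    · have hstep : pvStepA (d, sales) x = (d.insert x (d.getD x 0 - 1), sales + 1) := by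
        simp [pvStepA, hct x hx, hx]
      set d' := d.insert x (d.getD x 0 - 1) with hd'
      have hins : d'.getD x 0 = d.getD x 0 - 1 := PySem.Dict.getD_insert_self d x _ 0
      have hne' : ∀ k, k ≠ x → d'.getD k 0 = d.getD k 0 := fun k hk =>
        PySem.Dict.getD_insert_of_ne d _ 0 hk
      have hnn' : ∀ k, 0 ≤ d'.getD k 0 := by
        intro k
        by_cases hk : k = x
        · subst hk; rw [hins]; omega
        · rw [hne' k hk]; exact hnn k
      have hct' : ∀ k, 0 < d'.getD k 0 → d'.contains k = true := by
        intro k hkpos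
        rw [hd', PySem.Dict.contains_insert]
        by_cases hk : k = x
        · simp [hk]
        · rw [hne' k hk] at hkpos
          simp [hct k hkpos]
      rw [hstep, ih _ _ hnn' hct']
      have hmem : x ∈ insert x r.toFinset := Finset.mem_insert_self x _
      rw [← Finset.add_sum_erase _ _ hmem, Finset.erase_insert_eq_erase]
      by_cases hxr : x ∈ r.toFinset
      · rw [← Finset.add_sum_erase _ _ hxr]
        have h1 : Finset.sum (r.toFinset.erase x)
              (fun k => min (d'.getD k 0) (r.count k : Int))
            = Finset.sum (r.toFinset.erase x)
              (fun k => min (d.getD k 0) ((x :: r).count k : Int)) := by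
          apply Finset.sum_congr rfl
          intro k hk
          have hne : k ≠ x := (Finset.mem_erase.mp hk).1
          rw [hne' k hne, List.count_cons_of_ne (Ne.symm hne)]
        rw [h1, hins]
        have h2 : (x :: r).count x = r.count x + 1 := by simp
        rw [h2]; push_cast; omega
      · have hr0 : r.count x = 0 := by
          simpa [List.count_eq_zero] using fun h => hxr (List.mem_toFinset.mpr h)
        rw [Finset.erase_eq_of_notMem hxr]
        have h1 : Finset.sum r.toFinset
              (fun k => min (d'.getD k 0) (r.count k : Int))
            = Finset.sum r.toFinset
              (fun k => min (d.getD k 0) ((x :: r).count k : Int)) := by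
          apply Finset.sum_congr rfl
          intro k hk
          have hne : k ≠ x := by rintro rfl; exact hxr hk
          rw [hne' k hne, List.count_cons_of_ne (Ne.symm hne)]
        rw [h1]
        have h2 : (x :: r).count x = r.count x + 1 := by simp
        rw [h2, hr0]; push_cast; omega
    · have hx0 : d.getD x 0 = 0 := le_antisymm (by omega) (hnn x)
      have hstep : pvStepA (d, sales) x = (d, sales) := by
        simp [pvStepA, hx0]
      rw [hstep, ih _ _ hnn hct]
      have hmem : x ∈ insert x r.toFinset := Finset.mem_insert_self x _
      rw [← Finset.add_sum_erase _ _ hmem, Finset.erase_insert_eq_erase]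
      have h2 : (x :: r).count x = r.count x + 1 := by simp
      by_cases hxr : x ∈ r.toFinset
      · rw [← Finset.add_sum_erase _ (fun k => min (d.getD k 0) ((r.count k : Int))) hxr]
        have h1 : Finset.sum (r.toFinset.erase x)
              (fun k => min (d.getD k 0) (r.count k : Int))
            = Finset.sum (r.toFinset.erase x)
              (fun k => min (d.getD k 0) ((x :: r).count k : Int)) := by
          apply Finset.sum_congr rfl
          intro k hk
          rw [List.count_cons_of_ne (Ne.symm (Finset.mem_erase.mp hk).1)]
        rw [h1, h2, hx0]; push_cast; omega
      · rw [Finset.erase_eq_of_notMem hxr]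
        have h1 : Finset.sum r.toFinset
              (fun k => min (d.getD k 0) (r.count k : Int))
            = Finset.sum r.toFinset
              (fun k => min (d.getD k 0) ((x :: r).count k : Int)) := by
          apply Finset.sum_congr rfl
          intro k hk
          rw [List.count_cons_of_ne (Ne.symm (show k ≠ x by rintro rfl; exact hxr hk))]
        rw [h1, h2, hx0]; push_cast; omega

-- the ordered distinct elements of s carry the same Finset as s
lemma pv_ofList_toFinset (s : List Int) : (PySem.Set.ofList s).toFinset = s.toFinset := by
  apply Finset.ext
  intro k
  simp [List.mem_toFinset, PySem.Set.mem_ofList]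

-- B's sum over the keys of Counter(s), as a Finset sum over s.toFinset
lemma pv_alt_eq_finset (n m : Int) (s c : List Int) :
    solution_alt n m s c = ∑ k ∈ s.toFinset, min ((s.count k : Int)) ((c.count k : Int)) := by
  unfold solution_alt
  simp only [PySem.Dict.foldl_insert_getD_add_one_eq_counter, PySem.Dict.items_counter,
    List.map_map]
  have h1 : ((fun kv : Int × Int => min kv.2 ((PySem.Dict.counter c).getD kv.1 0)) ∘
        fun k => (k, (s.count k : Int)))
      = fun k => min ((s.count k : Int)) ((c.count k : Int)) := by
    funext k
    simp [PySem.Dict.getD_counter]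
  rw [h1, ← List.sum_toFinset _ (PySem.Set.nodup_ofList s), pv_ofList_toFinset]

-- a min-of-counts sum may be taken over either side's support
lemma pv_support_swap (s c : List Int) :
    (∑ k ∈ s.toFinset, min ((s.count k : Int)) ((c.count k : Int)))
      = ∑ k ∈ c.toFinset, min ((s.count k : Int)) ((c.count k : Int)) := by
  have hs : s.toFinset ⊆ s.toFinset ∪ c.toFinset := Finset.subset_union_left
  have hc : c.toFinset ⊆ s.toFinset ∪ c.toFinset := Finset.subset_union_right
  rw [Finset.sum_subset hs, Finset.sum_subset hc]
  · intro k _ hk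
    have : c.count k = 0 := by
      simpa [List.count_eq_zero] using fun h => hk (List.mem_toFinset.mpr h)
    rw [this]
    have : (0 : Int) ≤ (s.count k : Int) := by positivity
    omega
  · intro k _ hk
    have : s.count k = 0 := by
      simpa [List.count_eq_zero] using fun h => hk (List.mem_toFinset.mpr h)
    rw [this]
    have : (0 : Int) ≤ (c.count k : Int) := by positivity
    omega

-- ===== VERDICT (by name: the statement is the Claim_ definition above) =====
theorem solution_spec : Claim_equal_solution := by
  intro n m s c _
  unfold Spec_solution
  unfold solution
  simp only [PySem.Dict.foldl_insert_getD_add_one_eq_counter]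
  rw [pv_sell_loop c (PySem.Dict.counter s) 0
      (fun k => by rw [PySem.Dict.getD_counter]; positivity)
      (fun k hk => by
        rw [PySem.Dict.contains_counter]
        rw [PySem.Dict.getD_counter] at hk
        have : 0 < s.count k := by exact_mod_cast hk
        simpa [List.contains_iff_mem] using List.count_pos_iff.mp this)]
  simp only [PySem.Dict.getD_counter]
  rw [pv_alt_eq_finset, pv_support_swap]
  omega
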